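-- pv_equiv track=rewrite | github.com/Stephane-S/GNN_Fungal_Disease_Occcurence_Paper | Graph_Generation/augmentations/aug_utils.py | create_masks
-- ===== SOURCE A (Python) =====
-- def create_masks(masking_data, farm_id):
--
--     filtered_lists = [[y for x, y in sublist if x == farm_id] for sublist in masking_data]
--
--     total_len = sum(len(inner_list) for inner_list in filtered_lists)
--     train_masks = [0] * total_len
--     valid_masks = [0] * total_len
--     test_masks = [0] * total_len
--
--     train_masks = [1 if i + 1 in filtered_lists[0] else 0 for i in range(total_len)]
--     valid_masks = [1 if i + 1 in filtered_lists[1] else 0 for i in range(total_len)]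
--     test_masks = [1 if i + 1 in filtered_lists[2] else 0 for i in range(total_len)]
--
--     return train_masks, valid_masks, test_masks
-- ===== SOURCE B (Python) =====
-- def create_masks(masking_data, farm_id):
--     filtered = [[y for x, y in sub if x == farm_id] for sub in masking_data]
--     total_len = sum(len(l) for l in filtered)
--     masks = [[0] * total_len for _ in range(3)]
--     for mask, vals in zip(masks, filtered):
--         for v in vals:
--             if 1 <= v <= total_len:
--                 mask[v - 1] = 1
--     return masks[0], masks[1], masks[2]
-- ===== Notes on version B (the rewrite author's own statement) =====
-- stated objective: alternative
-- what changed: Replaces the three per-index membership scans (testing i+1 in filtered_lists[k] for every i in range(total_len)) by a single scatter pass that writes 1 at index v-1 for each in-range filtered value; asymptotically O(n+m) vs O(n*m), though a timing run could not measure a difference at the generated sizes.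
import Mathlib
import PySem

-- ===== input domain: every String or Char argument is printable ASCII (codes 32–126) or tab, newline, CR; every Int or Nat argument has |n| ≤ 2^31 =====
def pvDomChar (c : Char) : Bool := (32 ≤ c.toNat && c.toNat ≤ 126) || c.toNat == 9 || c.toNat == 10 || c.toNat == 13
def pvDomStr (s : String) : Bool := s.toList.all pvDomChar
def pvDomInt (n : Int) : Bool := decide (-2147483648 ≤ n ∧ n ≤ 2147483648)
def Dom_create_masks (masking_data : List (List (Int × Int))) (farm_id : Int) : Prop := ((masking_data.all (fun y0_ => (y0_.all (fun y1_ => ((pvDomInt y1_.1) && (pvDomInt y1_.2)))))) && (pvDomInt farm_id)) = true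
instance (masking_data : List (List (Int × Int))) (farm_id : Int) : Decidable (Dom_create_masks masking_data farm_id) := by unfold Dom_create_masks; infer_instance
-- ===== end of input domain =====

-- B replaces A's three per-index membership scans by one scatter pass; equal on Pre_ (where A does not raise IndexError).
-- ===== PORT A =====
-- filtered_lists = [[y for x, y in sublist if x == farm_id] for sublist in masking_data]
def pvFiltered (masking_data : List (List (Int × Int))) (farm_id : Int) : List (List Int) :=
  masking_data.map (fun sub => (sub.filter (fun p => p.1 == farm_id)).map Prod.snd)

def create_masks (masking_data : List (List (Int × Int))) (farm_id : Int) : List Int × List Int × List Int :=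
  let filtered_lists := pvFiltered masking_data farm_id
  let total_len : Nat := (filtered_lists.map List.length).sum
  -- filtered_lists[k]: Python raises IndexError when k is out of range and total_len > 0; those inputs
  -- are excluded by Pre_create_masks, so getD [] is exact on the admitted domain (for total_len = 0 the
  -- comprehension body never runs, matching the empty result).
  let train_masks := (List.range total_len).map (fun (i : Nat) => if ((i : Int) + 1) ∈ filtered_lists.getD 0 [] then (1 : Int) else 0)
  let valid_masks := (List.range total_len).map (fun (i : Nat) => if ((i : Int) + 1) ∈ filtered_lists.getD 1 [] then (1 : Int) else 0)
  let test_masks := (List.range total_len).map (fun (i : Nat) => if ((i : Int) + 1) ∈ filtered_lists.getD 2 [] then (1 : Int) else 0)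
  (train_masks, valid_masks, test_masks)

-- ===== PORT B =====
-- the inner scatter loop: for v in vals: if 1 <= v <= total_len: mask[v-1] = 1
def pvScatter (total_len : Nat) (vals : List Int) : List Int :=
  vals.foldl (fun mask v => if 1 ≤ v ∧ v ≤ (total_len : Int) then mask.set (v - 1).toNat 1 else mask)
    (List.replicate total_len (0 : Int))

def create_masks_alt (masking_data : List (List (Int × Int))) (farm_id : Int) : List Int × List Int × List Int :=
  let filtered := pvFiltered masking_data farm_id
  let total_len : Nat := (filtered.map List.length).sum
  -- zip(masks, filtered) pairs each of the 3 masks with filtered[k] (nothing, i.e. no writes, if missing)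
  (pvScatter total_len (filtered.getD 0 []), pvScatter total_len (filtered.getD 1 []),
   pvScatter total_len (filtered.getD 2 []))

-- ===== PRECONDITION & SPEC =====
-- Pre_ excludes exactly the inputs where A raises IndexError: fewer than 3 sublists while some pair matches
-- farm_id (then total_len > 0 and filtered_lists[k] is indexed out of range).
def Pre_create_masks (masking_data : List (List (Int × Int))) (farm_id : Int) : Prop :=
  3 ≤ masking_data.length ∨ ∀ sub ∈ masking_data, ∀ p ∈ sub, p.1 ≠ farm_id
instance (masking_data : List (List (Int × Int))) (farm_id : Int) : Decidable (Pre_create_masks masking_data farm_id) := by unfold Pre_create_masks; infer_instance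
def pvWitness_create_masks : (List (List (Int × Int))) × Int := ([[(1, 1), (2, 5)], [(1, 2)], [(1, 3)]], 1)

def Spec_create_masks (masking_data : List (List (Int × Int))) (farm_id : Int) (out : List Int × List Int × List Int) : Prop := out = create_masks_alt masking_data farm_id
instance (masking_data : List (List (Int × Int))) (farm_id : Int) (out : List Int × List Int × List Int) : Decidable (Spec_create_masks masking_data farm_id out) := by unfold Spec_create_masks; infer_instance

-- ===== CLAIM (what is proved, stated in full; the proofs are below) =====
def Claim_equal_create_masks : Prop := ∀ (masking_data : List (List (Int × Int))) (farm_id : Int), Dom_create_masks masking_data farm_id → Pre_create_masks masking_data farm_id → Spec_create_masks masking_data farm_id (create_masks masking_data farm_id)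

-- ===== LEMMAS AND PROOFS =====

lemma pvScatter_step_length (total_len : Nat) (mask : List Int) (v : Int) :
    (if 1 ≤ v ∧ v ≤ (total_len : Int) then mask.set (v - 1).toNat 1 else mask).length = mask.length := by
  split <;> simp

lemma pvScatter_foldl_length (total_len : Nat) (vals : List Int) (mask : List Int) :
    (vals.foldl (fun mask v => if 1 ≤ v ∧ v ≤ (total_len : Int) then mask.set (v - 1).toNat 1 else mask) mask).length = mask.length := by
  induction vals generalizing mask with
  | nil => rfl
  | cons v vs ih => rw [List.foldl_cons, ih _, pvScatter_step_length]

lemma pvScatter_foldl_getElem? (total_len : Nat) (vals : List Int) (mask : List Int)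
    (hm : mask.length = total_len) (j : Nat) (hj : j < total_len) :
    (vals.foldl (fun mask v => if 1 ≤ v ∧ v ≤ (total_len : Int) then mask.set (v - 1).toNat 1 else mask) mask)[j]?
      = if ((j : Int) + 1) ∈ vals then some 1 else mask[j]? := by
  induction vals generalizing mask with
  | nil => simp
  | cons v vs ih =>
    rw [List.foldl_cons, ih _ (by rw [pvScatter_step_length]; exact hm)]
    by_cases hmem : ((j : Int) + 1) ∈ vs
    · simp [hmem]
    · simp only [hmem, if_false, List.mem_cons, or_false]
      by_cases hv : v = (j : Int) + 1
      · have hg : 1 ≤ v ∧ v ≤ (total_len : Int) := by constructor <;> omega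
        have hidx : (v - 1).toNat = j := by omega
        rw [if_pos hg, hidx, List.getElem?_set_self (by omega), if_pos hv.symm]
      · have hvr : ¬ ((j : Int) + 1 = v) := fun h => hv h.symm
        split
        · next hg =>
          have hne : (v - 1).toNat ≠ j := by omega
          rw [List.getElem?_set_ne hne]
        · rfl

lemma pvScatter_eq (total_len : Nat) (vals : List Int) :
    (List.range total_len).map (fun (i : Nat) => if ((i : Int) + 1) ∈ vals then (1 : Int) else 0)
      = pvScatter total_len vals := by
  apply List.ext_getElem?
  intro j
  unfold pvScatter
  by_cases hj : j < total_len
  · rw [pvScatter_foldl_getElem? total_len vals _ (by simp) j hj,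
      List.getElem?_eq_getElem (by simpa using hj), List.getElem_map, List.getElem_range]
    by_cases hmem : ((j : Int) + 1) ∈ vals <;>
      simp [hmem, hj]
  · have h1 : ¬ j < ((List.range total_len).map
        (fun (i : Nat) => if ((i : Int) + 1) ∈ vals then (1 : Int) else 0)).length := by simpa using hj
    have h2 : ¬ j < (vals.foldl (fun mask v => if 1 ≤ v ∧ v ≤ (total_len : Int) then mask.set (v - 1).toNat 1 else mask) (List.replicate total_len (0 : Int))).length := by
      rw [pvScatter_foldl_length]; simpa using hj
    rw [List.getElem?_eq_none (by omega), List.getElem?_eq_none (by omega)]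

-- ===== VERDICT (by name: the statement is the Claim_ definition above) =====
theorem create_masks_spec : Claim_equal_create_masks := by
  intro md fid _ _
  unfold Spec_create_masks create_masks create_masks_alt
  simp only [pvScatter_eq]
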